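-- pv_equiv track=rewrite | github.com/hydroo/minor-thesis-barriers | models/prism/dissemination/gen.py | forMe
-- ===== SOURCE A (Python) =====
-- def forMe(p, processCount) :
-- 	#me and all but one other
-- 	l = []
-- 	for fromWhom in range(0, processCount) :
-- 		if fromWhom != p :
-- 			s = ""
-- 			for forWhom in range(0, processCount) :
-- 				if forWhom != fromWhom :
-- 					s += str(forWhom)
-- 			l += [s]
-- 	return l
-- ===== SOURCE B (Python) =====
-- def forMe(p, processCount):
--     # precompute the id strings once, then reuse via slicing
--     parts = [str(i) for i in range(processCount)]
--     l = []
--     for fromWhom in range(processCount):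
--         if fromWhom != p:
--             l.append("".join(parts[:fromWhom] + parts[fromWhom + 1:]))
--     return l
-- ===== Notes on version B (the rewrite author's own statement) =====
-- stated objective: simpler
-- what changed: B precomputes the list of id strings once and builds each sender's entry by joining the two table slices around that sender, removing A's inner loop that re-converts every id and grows a string by repeated += for every sender.
import Mathlib
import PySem

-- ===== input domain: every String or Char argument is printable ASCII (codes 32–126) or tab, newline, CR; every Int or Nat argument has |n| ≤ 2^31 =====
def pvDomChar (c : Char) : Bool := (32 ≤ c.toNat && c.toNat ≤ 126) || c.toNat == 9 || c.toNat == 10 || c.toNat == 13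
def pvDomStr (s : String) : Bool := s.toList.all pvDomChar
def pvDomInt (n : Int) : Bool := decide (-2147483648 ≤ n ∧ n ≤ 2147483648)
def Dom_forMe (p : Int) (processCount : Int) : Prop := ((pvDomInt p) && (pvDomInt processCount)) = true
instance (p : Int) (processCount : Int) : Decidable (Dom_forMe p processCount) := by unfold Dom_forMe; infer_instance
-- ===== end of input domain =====

-- B precomputes the per-id strings once and builds each entry by joining two slices of that
-- table, instead of A's inner loop that re-converts every id for every sender (objective: simpler).

-- ===== PORT A =====
def forMe (p : Int) (processCount : Int) : List String :=
  (PySem.List.pyRange 0 processCount 1).foldl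
    (fun l fromWhom =>
      if fromWhom ≠ p then
        l ++ [(PySem.List.pyRange 0 processCount 1).foldl
                (fun s forWhom => if forWhom ≠ fromWhom then s ++ PySem.Int.toStr forWhom else s)
                ""]
      else l)
    []

-- ===== PORT B =====
def forMe_alt (p : Int) (processCount : Int) : List String :=
  let parts := (PySem.List.pyRange 0 processCount 1).map PySem.Int.toStr
  (PySem.List.pyRange 0 processCount 1).foldl
    (fun l fromWhom =>
      if fromWhom ≠ p then
        l ++ [String.join (PySem.List.slice parts none (some fromWhom) ++
                           PySem.List.slice parts (some (fromWhom + 1)) none)]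
      else l)
    []

-- ===== PRECONDITION & SPEC =====
def Spec_forMe (p : Int) (processCount : Int) (out : List String) : Prop := out = forMe_alt p processCount
instance (p : Int) (processCount : Int) (out : List String) : Decidable (Spec_forMe p processCount out) := by unfold Spec_forMe; infer_instance

-- ===== CLAIM (what is proved, stated in full; the proofs are below) =====
def Claim_equal_forMe : Prop := ∀ (p : Int) (processCount : Int), Dom_forMe p processCount → Spec_forMe p processCount (forMe p processCount)

-- ===== LEMMAS AND PROOFS =====

-- Folding (++) from s0 equals s0 prepended to the fold from "".
theorem pv_foldl_str (l : List String) (s0 : String) :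
    l.foldl (fun r s => r ++ s) s0 = s0 ++ l.foldl (fun r s => r ++ s) "" := by
  induction l generalizing s0 with
  | nil => simp
  | cons a t ih =>
    simp only [List.foldl_cons]
    rw [ih (s0 ++ a), ih ("" ++ a)]
    simp [String.append_assoc]

-- A fold that never skips just concatenates the rendered pieces.
theorem pv_foldl_no_skip (i : Int) (f : Int → String) (xs : List Int)
    (h : ∀ j ∈ xs, j ≠ i) (s0 : String) :
    xs.foldl (fun s j => if j ≠ i then s ++ f j else s) s0
      = s0 ++ String.join (xs.map f) := by
  induction xs generalizing s0 with
  | nil => simp [String.join]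
  | cons a t ih =>
    have ha : a ≠ i := h a (by simp)
    simp only [List.foldl_cons, List.map_cons, if_pos ha, String.join]
    rw [ih (fun j hj => h j (by simp [hj])),
        pv_foldl_str (List.map f t) ("" ++ f a)]
    simp [String.append_assoc]
    rfl

-- A's inner loop for sender i equals the join of B's two table slices.
theorem pv_inner_eq (n i : Int) (h0 : 0 ≤ i) (hn : i < n) :
    (PySem.List.pyRange 0 n 1).foldl
        (fun s j => if j ≠ i then s ++ PySem.Int.toStr j else s) ""
      = String.join
          (PySem.List.slice ((PySem.List.pyRange 0 n 1).map PySem.Int.toStr) none (some i) ++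
           PySem.List.slice ((PySem.List.pyRange 0 n 1).map PySem.Int.toStr) (some (i + 1)) none) := by
  have hsplit : PySem.List.pyRange 0 n 1
      = PySem.List.pyRange 0 i 1 ++ i :: PySem.List.pyRange (i + 1) n 1 := by
    rw [PySem.List.pyRange_one_append 0 i n h0 (le_of_lt hn),
        PySem.List.pyRange_one_cons hn]
  have hlen1 : (PySem.List.pyRange 0 i 1).length = i.toNat := by
    simp [PySem.List.length_pyRange_one]
  have hi : i = ((i.toNat : Int)) := by omega
  have hs1 : PySem.List.slice ((PySem.List.pyRange 0 n 1).map PySem.Int.toStr) none (some i)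
      = (PySem.List.pyRange 0 i 1).map PySem.Int.toStr := by
    rw [hi, PySem.List.slice_to_natCast]
    rw [hsplit]
    simp [hlen1, max_eq_left h0]
  have hs2 : PySem.List.slice ((PySem.List.pyRange 0 n 1).map PySem.Int.toStr) (some (i + 1)) none
      = (PySem.List.pyRange (i + 1) n 1).map PySem.Int.toStr := by
    have : i + 1 = ((i.toNat + 1 : Nat) : Int) := by omega
    rw [this, PySem.List.slice_from_natCast]
    rw [hsplit, List.map_append, List.map_cons,
        show List.map PySem.Int.toStr (PySem.List.pyRange 0 i 1) ++
              PySem.Int.toStr i :: List.map PySem.Int.toStr (PySem.List.pyRange (i + 1) n 1)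
            = (List.map PySem.Int.toStr (PySem.List.pyRange 0 i 1) ++ [PySem.Int.toStr i]) ++
              List.map PySem.Int.toStr (PySem.List.pyRange (i + 1) n 1) by simp,
        List.drop_left' (by simp [hlen1])]
    rw [← this]
  rw [hs1, hs2, hsplit]
  rw [List.foldl_append, List.foldl_cons]
  rw [pv_foldl_no_skip i _ _ (fun j hj => by
        have := (PySem.List.mem_pyRange_one).1 hj; omega)]
  rw [if_neg (by simp), pv_foldl_no_skip i _ _ (fun j hj => by
        have := (PySem.List.mem_pyRange_one).1 hj; omega)]
  simp only [String.join, List.foldl_append]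
  rw [pv_foldl_str (List.map PySem.Int.toStr (PySem.List.pyRange (i + 1) n 1))
        (List.foldl (fun r s => r ++ s) "" (List.map PySem.Int.toStr (PySem.List.pyRange 0 i 1)))]
  simp

-- ===== VERDICT (by name: the statement is the Claim_ definition above) =====
theorem forMe_spec : Claim_equal_forMe := by
  intro p n _
  unfold Spec_forMe forMe forMe_alt
  refine PySem.List.foldl_congr_mem _ _ _ _ ?_
  intro l fromWhom hmem
  have h := (PySem.List.mem_pyRange_one).1 hmem
  by_cases hp : fromWhom ≠ p
  · simp only [if_pos hp]
    rw [pv_inner_eq n fromWhom h.1 h.2]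
  · simp [hp]
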